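-- pv_equiv track=rewrite | github.com/HimanshuLadva/Python-DSA | Leetcode/daily/202601/20260105.py | maxMatrixSumV1
-- ===== SOURCE A (Python) =====
-- from typing import List
--
-- def maxMatrixSumV1(matrix: List[List[int]]) -> int:
--     m = len(matrix)
--     negative_count = 0
--     m_sum = 0
--     smallest_neg = float('inf')
--     for i in range(m):
--         for j in range(m):
--             temp = abs(matrix[i][j])
--             if temp < smallest_neg:
--                 smallest_neg = temp
--             m_sum += temp
--             if matrix[i][j] < 0:
--                 negative_count += 1
--
--     if negative_count % 2 != 0:
--         m_sum -= 2 * smallest_neg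
--     return m_sum
-- ===== SOURCE B (Python) =====
-- def maxMatrixSumV1(matrix):
--     m = len(matrix)
--     flat = [matrix[i][j] for i in range(m) for j in range(m)]
--     if not flat:
--         return 0
--     order = sorted(flat, key=abs)
--     sign = 1
--     for x in flat:
--         if x < 0:
--             sign = -sign
--     return sum(abs(x) for x in order[1:]) + sign * abs(order[0])
-- ===== Notes on version B (the rewrite author's own statement) =====
-- stated objective: alternative
-- what changed: Replaces A's fused running-min/sum/count loop by: flatten via index comprehension, sort the cells by absolute value so the minimum-|x| cell is the head, track the parity of negatives as a running sign (+1/-1) product, and assemble the answer as sum of |x| over the sorted tail plus sign*|head|.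
import Mathlib
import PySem

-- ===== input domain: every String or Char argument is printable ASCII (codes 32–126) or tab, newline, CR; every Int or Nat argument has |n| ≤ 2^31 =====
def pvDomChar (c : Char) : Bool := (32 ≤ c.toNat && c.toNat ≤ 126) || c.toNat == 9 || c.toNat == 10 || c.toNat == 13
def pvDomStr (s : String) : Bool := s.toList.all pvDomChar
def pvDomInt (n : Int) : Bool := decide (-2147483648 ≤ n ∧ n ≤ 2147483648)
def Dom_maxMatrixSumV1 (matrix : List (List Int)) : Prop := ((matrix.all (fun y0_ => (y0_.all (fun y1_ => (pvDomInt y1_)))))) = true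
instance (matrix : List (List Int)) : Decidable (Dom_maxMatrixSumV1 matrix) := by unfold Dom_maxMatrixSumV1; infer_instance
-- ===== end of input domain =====

-- B replaces A's fused running-min/sum/count loop by sort-by-|x| (head = smallest |x|) plus a running sign product for the parity of negatives (alternative algorithm, similar cost).

-- ===== PORT A =====
-- state: (negative_count, m_sum, smallest_neg) — smallest_neg = none models float('inf')
def maxMatrixSumV1 (matrix : List (List Int)) : Int :=
  let m : Int := matrix.length
  let st := (PySem.List.pyRange 0 m 1).foldl (fun st i =>
      (PySem.List.pyRange 0 m 1).foldl (fun (st : Int × Int × Option Int) j =>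
        let x := PySem.List.pyGetD (PySem.List.pyGetD matrix i []) j 0
        let temp := |x|
        let smallest := match st.2.2 with
          | none => some temp
          | some v => if temp < v then some temp else some v
        (st.1 + (if x < 0 then 1 else 0), st.2.1 + temp, smallest)) st)
    ((0, 0, none) : Int × Int × Option Int)
  if st.1 % 2 ≠ 0 then st.2.1 - 2 * st.2.2.getD 0 else st.2.1

-- ===== PORT B =====
def maxMatrixSumV1_alt (matrix : List (List Int)) : Int :=
  let m : Int := matrix.length
  let flat := (PySem.List.pyRange 0 m 1).flatMap (fun i =>
    (PySem.List.pyRange 0 m 1).map (fun j =>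
      PySem.List.pyGetD (PySem.List.pyGetD matrix i []) j 0))
  match PySem.List.sorted flat (fun x => |x|) with
  | [] => 0
  | h :: t =>
    let sign := flat.foldl (fun s x => if x < 0 then -s else s) (1 : Int)
    (t.map (fun x => |x|)).sum + sign * |h|

-- ===== PRECONDITION & SPEC =====
-- Pre_ excludes exactly the ragged matrices on which A raises IndexError (some row shorter than the number of rows).
def Pre_maxMatrixSumV1 (matrix : List (List Int)) : Prop :=
  ∀ row ∈ matrix, matrix.length ≤ row.length
instance (matrix : List (List Int)) : Decidable (Pre_maxMatrixSumV1 matrix) := by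
  unfold Pre_maxMatrixSumV1; infer_instance
def pvWitness_maxMatrixSumV1 : List (List Int) := [[1, -2], [3, 4]]

def Spec_maxMatrixSumV1 (matrix : List (List Int)) (out : Int) : Prop := out = maxMatrixSumV1_alt matrix
instance (matrix : List (List Int)) (out : Int) : Decidable (Spec_maxMatrixSumV1 matrix out) := by unfold Spec_maxMatrixSumV1; infer_instance

-- ===== CLAIM (what is proved, stated in full; the proofs are below) =====
def Claim_equal_maxMatrixSumV1 : Prop := ∀ (matrix : List (List Int)), Dom_maxMatrixSumV1 matrix → Pre_maxMatrixSumV1 matrix → Spec_maxMatrixSumV1 matrix (maxMatrixSumV1 matrix)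

-- ===== LEMMAS AND PROOFS =====

-- A's fused step, as a named function
def pvStep (st : Int × Int × Option Int) (x : Int) : Int × Int × Option Int :=
  (st.1 + (if x < 0 then 1 else 0), st.2.1 + |x|,
    match st.2.2 with
    | none => some |x|
    | some v => if |x| < v then some |x| else some v)

lemma pvStep_eq (st : Int × Int × Option Int) (x : Int) :
    (st.1 + (if x < 0 then 1 else 0), st.2.1 + |x|,
      (match st.2.2 with
       | none => some |x|
       | some v => if |x| < v then some |x| else some v : Option Int)) = pvStep st x := rfl

-- inner loop over j with out-of-range default = fold over the truncated row
lemma inner_fold (row : List Int) (m : Nat) (h : m ≤ row.length)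
    (st : Int × Int × Option Int) :
    (PySem.List.pyRange 0 (m : Int) 1).foldl
      (fun st j => pvStep st (PySem.List.pyGetD row j 0)) st
    = (row.take m).foldl pvStep st := by
  have hcongr :
      (PySem.List.pyRange 0 (m : Int) 1).foldl
        (fun st j => pvStep st (PySem.List.pyGetD row j 0)) st
      = (PySem.List.pyRange 0 (m : Int) 1).foldl
        (fun st j => pvStep st (PySem.List.pyGetD (row.take m) j 0)) st := by
    apply PySem.List.foldl_congr_mem
    intro st j hj
    rcases (PySem.List.mem_pyRange_one).1 hj with ⟨hj0, hjm⟩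
    have hj' : j.toNat < m := by omega
    have h1 : PySem.List.pyGetD row j 0 = PySem.List.pyGetD (row.take m) j 0 := by
      rw [PySem.List.pyGetD_of_nonneg _ _ hj0, PySem.List.pyGetD_of_nonneg _ _ hj0]
      have hq : (row.take m)[j.toNat]? = row[j.toNat]? := List.getElem?_take_of_lt hj'
      simp [List.getD_eq_getElem?_getD, hq]
    rw [h1]
  have hm : (m : Int) = PySem.List.len (row.take m) := by
    simp [PySem.List.len, Nat.min_eq_left h]
  rw [hcongr, hm, PySem.List.foldl_pyRange_pyGetD _ _ _ _ (le_refl 0)]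
  simp

-- the inner index comprehension = the truncated row (B side)
lemma inner_map (row : List Int) (m : Nat) (h : m ≤ row.length) :
    (PySem.List.pyRange 0 (m : Int) 1).map (fun j => PySem.List.pyGetD row j 0)
    = row.take m := by
  have hcongr :
      (PySem.List.pyRange 0 (m : Int) 1).map (fun j => PySem.List.pyGetD row j 0)
      = (PySem.List.pyRange 0 (m : Int) 1).map (fun j => PySem.List.pyGetD (row.take m) j 0) := by
    apply List.map_congr_left
    intro j hj
    rcases (PySem.List.mem_pyRange_one).1 hj with ⟨hj0, hjm⟩
    have hj' : j.toNat < m := by omega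
    rw [PySem.List.pyGetD_of_nonneg _ _ hj0, PySem.List.pyGetD_of_nonneg _ _ hj0]
    have hq : (row.take m)[j.toNat]? = row[j.toNat]? := List.getElem?_take_of_lt hj'
    simp [List.getD_eq_getElem?_getD, hq]
  have hm : (m : Int) = PySem.List.len (row.take m) := by
    simp [PySem.List.len, Nat.min_eq_left h]
  rw [hcongr, hm]
  exact PySem.List.map_pyGetD_pyRange_zero _ _

-- B's flattening comprehension = the rows, each truncated to the matrix height
lemma flat_eq (matrix : List (List Int)) (h : Pre_maxMatrixSumV1 matrix) :
    (PySem.List.pyRange 0 (matrix.length : Int) 1).flatMap (fun i =>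
      (PySem.List.pyRange 0 (matrix.length : Int) 1).map (fun j =>
        PySem.List.pyGetD (PySem.List.pyGetD matrix i []) j 0))
    = matrix.flatMap (fun row => row.take matrix.length) := by
  have h1 :
      (PySem.List.pyRange 0 (matrix.length : Int) 1).map (fun i =>
        (PySem.List.pyRange 0 (matrix.length : Int) 1).map (fun j =>
          PySem.List.pyGetD (PySem.List.pyGetD matrix i []) j 0))
      = (PySem.List.pyRange 0 (matrix.length : Int) 1).map (fun i =>
          (PySem.List.pyGetD matrix i []).take matrix.length) := by
    apply List.map_congr_left
    intro i hi
    rcases (PySem.List.mem_pyRange_one).1 hi with ⟨hi0, him⟩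
    have hrow : PySem.List.pyGetD matrix i [] ∈ matrix := by
      apply PySem.List.pyGetD_mem
      constructor <;> omega
    exact inner_map _ _ (h _ hrow)
  have h2 :
      (PySem.List.pyRange 0 (matrix.length : Int) 1).map (fun i =>
          (PySem.List.pyGetD matrix i []).take matrix.length)
      = matrix.map (fun row => row.take matrix.length) := by
    have key : ∀ (n : Nat),
        (PySem.List.pyRange 0 (matrix.length : Int) 1).map (fun i =>
          (PySem.List.pyGetD matrix i []).take n)
        = matrix.map (fun row => row.take n) := by
      intro n
      conv_rhs => rw [← PySem.List.map_pyGetD_pyRange_zero' matrix ([] : List Int)]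
      rw [List.map_map]
      rfl
    exact key matrix.length
  rw [List.flatMap_def, h1, h2, ← List.flatMap_def]

-- the fused fold computes the three aggregates
lemma fused_fold (l : List Int) (c s : Int) (o : Option Int) :
    l.foldl pvStep (c, s, o)
    = (c + (l.countP (fun x => x < 0) : Int), s + (l.map (fun x => |x|)).sum,
        (l.map (fun x => |x|)).foldl
          (fun o t => match o with
            | none => some t
            | some v => if t < v then some t else some v) o) := by
  induction l generalizing c s o with
  | nil => simp
  | cons x t ih =>
    simp only [List.foldl_cons, List.map_cons, List.countP_cons, pvStep, ih, Prod.mk.injEq]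
    refine ⟨?_, ?_, trivial⟩
    · by_cases hx : x < 0 <;> simp [hx] <;> ring
    · simp [List.sum_cons]; ring

-- the running-min fold is min? of the list
lemma min_fold (l : List Int) :
    l.foldl (fun o t => match o with
        | none => some t
        | some v => if t < v then some t else some v) (none : Option Int)
    = PySem.List.min? l (fun y => y) := by
  cases l with
  | nil => rfl
  | cons x t =>
    rw [PySem.List.min?_id_cons]
    simp only [List.foldl_cons]
    have : ∀ (t : List Int) (v : Int),
        t.foldl (fun o t => match o with
          | none => some t
          | some v => if t < v then some t else some v) (some v)
        = some (t.foldl min v) := by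
      intro t
      induction t with
      | nil => intro v; rfl
      | cons y u ih =>
        intro v
        have hstep : (if y < v then some y else some v) = some (min v y) := by
          by_cases h : y < v
          · simp [h, min_eq_right h.le]
          · simp [h, min_eq_left (not_lt.1 h)]
        simp only [List.foldl_cons, hstep, ih]
    exact this t x

-- outer loop = fold over the rows, each truncated to the matrix height
lemma outer_fold (matrix : List (List Int)) (h : Pre_maxMatrixSumV1 matrix)
    (st : Int × Int × Option Int) :
    (PySem.List.pyRange 0 (matrix.length : Int) 1).foldl (fun st i =>
      (PySem.List.pyRange 0 (matrix.length : Int) 1).foldl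
        (fun st j => pvStep st (PySem.List.pyGetD (PySem.List.pyGetD matrix i []) j 0)) st) st
    = matrix.foldl (fun st row => (row.take matrix.length).foldl pvStep st) st := by
  have hlen : (matrix.length : Int) = PySem.List.len matrix := by simp [PySem.List.len]
  rw [hlen]
  have := PySem.List.foldl_pyRange_pyGetD (xs := matrix) (a := 0)
    (f := fun st row => (PySem.List.pyRange 0 (PySem.List.len matrix) 1).foldl
        (fun st j => pvStep st (PySem.List.pyGetD row j 0)) st)
    (d := []) (init := st) (by omega)
  simp only [List.drop_zero, Int.toNat_zero] at this
  rw [this]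
  apply PySem.List.foldl_congr_mem
  intro st row hrow
  rw [← hlen]
  exact inner_fold row matrix.length (h row hrow) st

-- the running sign product = the parity of the count of negatives
lemma sign_fold (l : List Int) (s : Int) :
    l.foldl (fun s x => if x < 0 then -s else s) s
    = if l.countP (fun x => x < 0) % 2 = 1 then -s else s := by
  induction l generalizing s with
  | nil => simp
  | cons x t ih =>
    by_cases hx : x < 0
    · simp only [List.foldl_cons, hx, if_true, List.countP_cons, ih]
      have : (t.countP (fun x => x < 0) + 1) % 2 = 1 ↔ ¬ t.countP (fun x => x < 0) % 2 = 1 := by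
        omega
      by_cases hp : t.countP (fun x => x < 0) % 2 = 1 <;>
        simp [hp, hx, Nat.add_mod] <;> omega
    · simp [List.foldl_cons, hx, List.countP_cons, ih]

-- the head of the sort-by-|x| is the running minimum of the absolute values
lemma sorted_head_min (l : List Int) (h : Int) (t : List Int)
    (hs : PySem.List.sorted l (fun x => |x|) = h :: t) :
    PySem.List.min? (l.map (fun x => |x|)) (fun y => y) = some |h| := by
  have hperm : (h :: t).Perm l := hs ▸ PySem.List.sorted_perm l (fun x => |x|) false
  have hlne : l ≠ [] := by
    intro hc
    have hnil : PySem.List.sorted l (fun x => |x|) = [] :=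
      (PySem.List.sorted_eq_nil_iff l (fun x : Int => |x|) false).2 hc
    rw [hs] at hnil
    exact List.cons_ne_nil h t hnil
  have hne : l.map (fun x => |x|) ≠ [] := by simpa using hlne
  rcases Option.ne_none_iff_exists'.1
      (fun hc => hne ((PySem.List.min?_eq_none_iff (l.map (fun x => |x|)) (fun y : Int => y)).1 hc)) with ⟨v, hv⟩
  have hvmem : v ∈ l.map (fun x => |x|) := PySem.List.min?_mem hv
  have hvmin : ∀ y ∈ l.map (fun x => |x|), v ≤ y := by
    intro y hy; exact PySem.List.min?_isMin hv y hy
  have hh : h ∈ l := hperm.mem_iff.1 (List.mem_cons_self)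
  have hle1 : v ≤ |h| := hvmin _ (List.mem_map_of_mem hh)
  rcases List.mem_map.1 hvmem with ⟨x, hx, rfl⟩
  have hle2 : |h| ≤ |x| := PySem.List.key_head_sorted_le l (fun x => |x|) hs x hx
  rw [hv]
  congr 1
  omega

theorem maxMatrixSumV1_spec_aux (matrix : List (List Int))
    (hpre : Pre_maxMatrixSumV1 matrix) :
    maxMatrixSumV1 matrix = maxMatrixSumV1_alt matrix := by
  unfold maxMatrixSumV1 maxMatrixSumV1_alt
  simp only [pvStep_eq]
  rw [outer_fold matrix hpre, flat_eq matrix hpre]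
  set l := matrix.flatMap (fun row => row.take matrix.length) with hl
  have hfold : matrix.foldl (fun st row => (row.take matrix.length).foldl pvStep st)
      ((0, 0, none) : Int × Int × Option Int) = l.foldl pvStep (0, 0, none) := by
    rw [hl, List.foldl_flatMap]
  rw [hfold, fused_fold, min_fold]
  cases hs : PySem.List.sorted l (fun x => |x|) with
  | nil =>
    have : l = [] := (PySem.List.sorted_eq_nil_iff _ _ _).1 hs
    simp [this]
  | cons h t =>
    have hperm : (h :: t).Perm l := hs ▸ PySem.List.sorted_perm l (fun x => |x|) false
    have hsum : |h| + (t.map (fun x => |x|)).sum = (l.map (fun x => |x|)).sum := by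
      have := (hperm.map (fun x => |x|)).sum_eq
      simpa using this
    have hmin := sorted_head_min l h t hs
    rw [hmin, sign_fold]
    simp only [Option.getD_some, zero_add]
    have hcast : ((l.countP (fun x => x < 0) : Int) % 2 ≠ 0) ↔
        (l.countP (fun x => x < 0) % 2 = 1) := by omega
    by_cases hp : l.countP (fun x => x < 0) % 2 = 1
    · rw [if_pos (hcast.2 hp), if_pos hp]; omega
    · rw [if_neg (fun hc => hp (hcast.1 hc)), if_neg hp]; omega

-- ===== VERDICT (by name: the statement is the Claim_ definition above) =====
theorem maxMatrixSumV1_spec : Claim_equal_maxMatrixSumV1 := by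
  intro matrix _ hpre
  exact maxMatrixSumV1_spec_aux matrix hpre
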